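-- pv_equiv track=rewrite | github.com/ElleNajt/TinyProjects | MarkovChains/SLEExperiments.py | check_self_avoiding
-- ===== SOURCE A (Python) =====
-- def check_self_avoiding(path):
--     # Returns true if the path is self avoiding
--     i = 0
--     length = len(path)
--     while i <= length - 1:
--         for x in path[i + 1 : length]:
--             if x == path[i]:
--                 return False
--         i += 1
--     return True
-- ===== SOURCE B (Python) =====
-- def check_self_avoiding(path):
--     # Returns true if the path is self avoiding
--     return len(set(path)) == len(path)
-- ===== Notes on version B (the rewrite author's own statement) =====
-- stated objective: simpler
-- what changed: Replaces the nested pairwise scan with a single cardinality test: build set(path) once and compare its size to len(path).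
import Mathlib
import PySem

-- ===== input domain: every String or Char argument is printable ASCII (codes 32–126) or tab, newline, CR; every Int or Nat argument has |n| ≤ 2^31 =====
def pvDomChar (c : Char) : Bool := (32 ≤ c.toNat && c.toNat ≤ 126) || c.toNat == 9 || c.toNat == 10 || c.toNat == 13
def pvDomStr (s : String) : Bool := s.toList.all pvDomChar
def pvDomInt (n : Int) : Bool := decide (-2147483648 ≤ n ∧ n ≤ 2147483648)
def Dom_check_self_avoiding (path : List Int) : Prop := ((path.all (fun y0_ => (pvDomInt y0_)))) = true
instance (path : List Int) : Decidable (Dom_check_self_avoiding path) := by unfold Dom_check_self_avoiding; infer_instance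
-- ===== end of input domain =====

-- B replaces A's nested O(n^2) pairwise scan with a one-pass cardinality test (len(set(path)) == len(path)): simpler and asymptotically faster.


-- ===== PORT A =====
-- The while loop over i (0 ≤ i ≤ length-1; 'i ≤ length-1' over Python ints is 'i+1 ≤ length' for Nat i);
-- the inner 'for x in path[i+1:length]: if x == path[i]: return False' is the early-exit scan, i.e. List.any.
-- path.getD i 0 is exact for path[i]: the loop guard guarantees 0 ≤ i < length.
def check_self_avoiding_loop (path : List Int) (i : Nat) : Bool :=
  if i + 1 ≤ path.length then
    if (PySem.List.slice path (some ((i : Int) + 1)) (some (path.length : Int))).any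
        (fun x => x == path.getD i 0) then
      false
    else
      check_self_avoiding_loop path (i + 1)
  else
    true
termination_by path.length - i

def check_self_avoiding (path : List Int) : Bool :=
  check_self_avoiding_loop path 0

-- ===== PORT B =====
-- len(set(path)) == len(path)
def check_self_avoiding_alt (path : List Int) : Bool :=
  PySem.Set.len (PySem.Set.ofList path) == (path.length : Int)

-- ===== PRECONDITION & SPEC =====
def Spec_check_self_avoiding (path : List Int) (out : Bool) : Prop := out = check_self_avoiding_alt path
instance (path : List Int) (out : Bool) : Decidable (Spec_check_self_avoiding path out) := by unfold Spec_check_self_avoiding; infer_instance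

-- ===== CLAIM (what is proved, stated in full; the proofs are below) =====
def Claim_equal_check_self_avoiding : Prop := ∀ (path : List Int), Dom_check_self_avoiding path → Spec_check_self_avoiding path (check_self_avoiding path)

-- ===== LEMMAS AND PROOFS =====

-- upper bound: folding Set.add over xs grows the accumulator by at most one per element
theorem pv_foldl_add_len_le (xs : List Int) : ∀ (s : PySem.Set Int),
    (xs.foldl PySem.Set.add s).length ≤ s.length + xs.length := by
  induction xs with
  | nil => intro s; simp
  | cons x xs ih =>
    intro s
    have h := ih (PySem.Set.add s x)
    have hadd : (PySem.Set.add s x).length ≤ s.length + 1 := by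
      unfold PySem.Set.add
      split <;> simp
    simpa using h.trans (by omega)

-- if xs has no duplicates and is disjoint from s, every element is new
theorem pv_foldl_add_len_of_nodup (xs : List Int) : ∀ (s : PySem.Set Int),
    xs.Nodup → (∀ x ∈ xs, x ∉ s) →
    (xs.foldl PySem.Set.add s).length = s.length + xs.length := by
  induction xs with
  | nil => intro s _ _; simp
  | cons x xs ih =>
    intro s hnd hdis
    have hx : x ∉ s := hdis x (by simp)
    have hadd : PySem.Set.add s x = s ++ [x] := by
      unfold PySem.Set.add PySem.Set.contains
      simp [List.contains_eq_mem, hx]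
    have hnd' : xs.Nodup := (List.nodup_cons.mp hnd).2
    have hxnotin : x ∉ xs := (List.nodup_cons.mp hnd).1
    have hdis' : ∀ y ∈ xs, y ∉ s ++ [x] := by
      intro y hy
      simp only [List.mem_append, List.mem_singleton]
      rintro (h | rfl)
      · exact hdis y (by simp [hy]) h
      · exact hxnotin hy
    have := ih (s ++ [x]) hnd' hdis'
    simp only [List.foldl_cons, hadd] at *
    simp [this]; omega

-- conversely, full length forces xs nodup and disjoint from s
theorem pv_foldl_add_len_eq_imp (xs : List Int) : ∀ (s : PySem.Set Int),
    (xs.foldl PySem.Set.add s).length = s.length + xs.length →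
    xs.Nodup ∧ ∀ x ∈ xs, x ∉ s := by
  induction xs with
  | nil => intro s _; simp
  | cons x xs ih =>
    intro s heq
    simp only [List.foldl_cons] at heq
    by_cases hx : x ∈ s
    · exfalso
      have hadd : PySem.Set.add s x = s := by
        unfold PySem.Set.add PySem.Set.contains
        simp [List.contains_eq_mem, hx]
      rw [hadd] at heq
      have := pv_foldl_add_len_le xs s
      simp [List.length_cons] at heq
      omega
    · have hadd : PySem.Set.add s x = s ++ [x] := by
        unfold PySem.Set.add PySem.Set.contains
        simp [List.contains_eq_mem, hx]
      rw [hadd] at heq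
      have hlen : (xs.foldl PySem.Set.add (s ++ [x])).length = (s ++ [x]).length + xs.length := by
        simp at heq ⊢; omega
      obtain ⟨hnd, hdis⟩ := ih (s ++ [x]) hlen
      refine ⟨List.nodup_cons.mpr ⟨?_, hnd⟩, ?_⟩
      · intro hmem
        exact hdis x hmem (by simp)
      · intro y hy
        rcases List.mem_cons.mp hy with rfl | hy'
        · exact hx
        · intro hys
          exact hdis y hy' (by simp [hys])

-- B computes decide path.Nodup
theorem pv_alt_eq_nodup (path : List Int) :
    check_self_avoiding_alt path = decide path.Nodup := by
  unfold check_self_avoiding_alt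
  rw [PySem.Set.ofList_eq_foldl]
  unfold PySem.Set.len
  by_cases h : path.Nodup
  · have := pv_foldl_add_len_of_nodup path [] h (by simp)
    simp [this, h]
  · simp [h]
    intro hlen
    have : (List.foldl PySem.Set.add [] path).length = ([] : List Int).length + path.length := by
      simp; omega
    exact h (pv_foldl_add_len_eq_imp path [] this).1

-- A's loop decides Nodup of the remaining suffix
theorem pv_loop_eq_nodup (path : List Int) : ∀ (i : Nat),
    check_self_avoiding_loop path i = decide (path.drop i).Nodup := by
  intro i
  induction hn : path.length - i using Nat.strong_induction_on generalizing i with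
  | _ n ih =>
  unfold check_self_avoiding_loop
  by_cases h : i + 1 ≤ path.length
  · simp only [if_pos h]
    have hi : i < path.length := h
    have hdrop : path.drop i = path[i] :: path.drop (i + 1) :=
      List.drop_eq_getElem_cons hi
    have hgetD : path.getD i 0 = path[i] := List.getD_eq_getElem path 0 hi
    have hslice : PySem.List.slice path (some ((i : Int) + 1)) (some (path.length : Int))
        = path.drop (i + 1) := by
      have : ((i : Int) + 1) = ((i + 1 : Nat) : Int) := by push_cast; ring
      rw [this, PySem.List.slice_natCast]
      exact List.take_of_length_le (by simp)
    have hany : ((path.drop (i + 1)).any (fun x => x == path[i]))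
        = decide (path[i] ∈ path.drop (i + 1)) := by
      simp [List.any_beq', List.contains_eq_mem]
    rw [hslice, hgetD, hany]
    by_cases hmem : path[i] ∈ path.drop (i + 1)
    · rw [if_pos (by simp [hmem])]
      exact (decide_eq_false (by
        rw [hdrop]; exact fun hnd => (List.nodup_cons.mp hnd).1 hmem)).symm
    · rw [if_neg (by simp [hmem])]
      rw [ih (path.length - (i + 1)) (by omega) (i + 1) rfl, hdrop]
      have hiff : (path[i] :: path.drop (i + 1)).Nodup ↔ (path.drop (i + 1)).Nodup := by
        rw [List.nodup_cons]; simp [hmem]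
      exact (decide_eq_decide.mpr hiff).symm
  · simp only [if_neg h]
    have : path.drop i = [] := List.drop_eq_nil_of_le (by omega)
    simp [this]

-- ===== VERDICT (by name: the statement is the Claim_ definition above) =====
theorem check_self_avoiding_spec : Claim_equal_check_self_avoiding := by
  intro path _
  unfold Spec_check_self_avoiding check_self_avoiding
  rw [pv_loop_eq_nodup path 0, pv_alt_eq_nodup]
  simp
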